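-- pv_equiv track=rewrite | github.com/zeeshannisar/resource-effecient-multi-stain-kidney-glomeruli-segmentation | downstream_tasks/unet/unet_with_simclr_and_byol/code/unet/unet_models.py | getoutputsize
-- ===== SOURCE A (Python) =====
-- import math
--
-- def getoutputsize(inp_shape, depth=5, k_size=3, padding='valid', data_format='channels_last'):
--     convolutions_per_layer = 2
--
--     if data_format not in {'channels_first', 'channels_last'}:
--         raise ValueError('Unknown data_format: ', data_format)
--
--     def calculate_bridge_end_size(dim_size):
--         # Calculate what the last feature map size would be with this patch size
--         dim_size = float(dim_size)
--         for _ in range(depth - 1):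
--             dim_size = (dim_size - ((k_size - 1) * convolutions_per_layer)) / 2
--         if not dim_size.is_integer():
--             raise ValueError(
--                 'This input shape produces a non-integer feature map shape, use getvalidinputsize to calculate a valid input shape.')
--         dim_size -= (k_size - 1) * 2
--
--         # Minimum possible size of last feature map
--         if dim_size < 4:
--             dim_size = 4
--
--         # Round to the next smallest even number
--         dim_size = math.floor(dim_size / 2.) * 2
--
--         return int(dim_size)
--
--     def calculate_output_size(dim_size):
--         # Calculate what the last feature map size would be with this patch size
--         dim_size = float(dim_size)
--         for _ in range(depth - 1):
--             dim_size = (dim_size * 2) - ((k_size - 1) * convolutions_per_layer)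
--         if not dim_size.is_integer():
--             raise ValueError(
--                 'This input shape produces non-integer feature map size, use getvalidinputsize to calculate a valid input shape.')
--
--         return int(dim_size)
--
--     if data_format == 'channels_last':
--         spatial_dims = range(len(inp_shape))[:-1]
--     elif data_format == 'channels_first':
--         spatial_dims = range(len(inp_shape))[1:]
--
--     inp_shape = list(inp_shape)
--     if padding == 'valid':
--         otp_shape = [0] * len(inp_shape)
--         for d in spatial_dims:
--             inp_shape[d] = calculate_bridge_end_size(inp_shape[d])
--             otp_shape[d] = calculate_output_size(inp_shape[d])
--     else:
--         otp_shape = inp_shape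
--
--     return tuple(otp_shape)
-- ===== SOURCE B (Python) =====
-- def getoutputsize(inp_shape, depth=5, k_size=3, padding='valid', data_format='channels_last'):
--     if data_format not in ('channels_first', 'channels_last'):
--         raise ValueError('Unknown data_format: ', data_format)
--     shape = list(inp_shape)
--     if padding != 'valid':
--         return tuple(shape)
--     n = max(depth - 1, 0)
--     p = 2 ** n
--     c = (k_size - 1) * 2
--     if data_format == 'channels_last':
--         lo, hi = 0, len(shape) - 1
--     else:
--         lo, hi = 1, len(shape)
--     out = []
--     for d, x in enumerate(shape):
--         if d < lo or d >= hi: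
--             out.append(0)
--             continue
--         num = x - c * (p - 1)
--         if num % p:
--             raise ValueError(
--                 'This input shape produces a non-integer feature map shape, use getvalidinputsize to calculate a valid input shape.')
--         bridge = max(num // p - c, 4) // 2 * 2
--         out.append(bridge * p - c * (p - 1))
--     return tuple(out)
-- ===== Notes on version B (the rewrite author's own statement) =====
-- stated objective: simpler
-- what changed: replaced the two per-dimension float loops over range(depth-1) with exact closed-form integer arithmetic (geometric-series formulas) applied once per spatial dimension in a single enumerate pass
-- outside the precondition, e.g. on getoutputsize([100, 3], 100, 3, 'valid', 'channels_last'): A returns (4, 0), B raises ValueError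
import Mathlib
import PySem

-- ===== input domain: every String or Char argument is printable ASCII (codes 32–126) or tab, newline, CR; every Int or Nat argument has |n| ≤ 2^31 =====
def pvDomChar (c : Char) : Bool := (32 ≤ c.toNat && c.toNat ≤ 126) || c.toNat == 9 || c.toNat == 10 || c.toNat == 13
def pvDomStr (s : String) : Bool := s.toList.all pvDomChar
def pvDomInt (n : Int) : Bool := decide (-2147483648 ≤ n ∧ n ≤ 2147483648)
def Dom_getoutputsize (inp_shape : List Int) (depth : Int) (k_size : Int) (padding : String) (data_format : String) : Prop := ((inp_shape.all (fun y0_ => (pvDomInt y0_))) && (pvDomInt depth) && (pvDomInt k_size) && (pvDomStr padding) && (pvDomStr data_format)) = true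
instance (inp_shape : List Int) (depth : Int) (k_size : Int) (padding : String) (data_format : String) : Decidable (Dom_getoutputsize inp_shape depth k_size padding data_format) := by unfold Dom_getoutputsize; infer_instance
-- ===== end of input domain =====

-- B replaces A's two per-dimension float loops over range(depth-1) by exact closed-form
-- integer arithmetic (geometric-series formulas) in a single enumerate pass (objective: simpler).

-- ===== PORT A =====
-- Python A computes with binary64 floats; on every input admitted by Pre_ (depth ≤ 19,
-- |ints| ≤ 2^31) each of A's float operations is exact, so Rat models them exactly there.
def pvBridgeA (depth k : Int) (x : Int) : Option Int :=
  -- dim_size = float(dim_size); for _ in range(depth-1): dim_size = (dim_size - (k-1)*2)/2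
  if ((List.range (depth - 1).toNat).foldl
        (fun v _ => (v - ((((k - 1) * 2 : Int)) : Rat)) / 2) ((x : Rat))).den = 1 then  -- is_integer()
    some (PySem.Int.floordiv
      -- dim_size -= (k_size-1)*2; if dim_size < 4: dim_size = 4
      (if ((List.range (depth - 1).toNat).foldl
            (fun v _ => (v - ((((k - 1) * 2 : Int)) : Rat)) / 2) ((x : Rat))).num - (k - 1) * 2 < 4
       then 4
       else ((List.range (depth - 1).toNat).foldl
            (fun v _ => (v - ((((k - 1) * 2 : Int)) : Rat)) / 2) ((x : Rat))).num - (k - 1) * 2)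
      2 * 2)                                   -- int(math.floor(dim_size/2.)*2)
  else none                                    -- raise ValueError

def pvOutputA (depth k : Int) (x : Int) : Option Int :=
  -- dim_size = float(dim_size); for _ in range(depth-1): dim_size = dim_size*2 - (k-1)*2
  if ((List.range (depth - 1).toNat).foldl
        (fun v _ => v * 2 - ((((k - 1) * 2 : Int)) : Rat)) ((x : Rat))).den = 1 then    -- is_integer()
    some ((List.range (depth - 1).toNat).foldl
        (fun v _ => v * 2 - ((((k - 1) * 2 : Int)) : Rat)) ((x : Rat))).num             -- int(dim_size)
  else none                                    -- raise ValueError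

def pvLoopA (depth k : Int) : List Int → List Int → List Int → Option (List Int)
  | [], _inp, otp => some otp
  | d :: rest, inp, otp =>
    match PySem.List.pyGet? inp d with         -- inp_shape[d] (d comes from range(len), in range)
    | none => none
    | some x =>
      match pvBridgeA depth k x with           -- inp_shape[d] = calculate_bridge_end_size(...)
      | none => none
      | some b =>
        match pvOutputA depth k b with         -- otp_shape[d] = calculate_output_size(...)
        | none => none
        | some o => pvLoopA depth k rest (inp.set d.toNat b) (otp.set d.toNat o)

def getoutputsize (inp_shape : List Int) (depth : Int) (k_size : Int) (padding : String) (data_format : String) : List Int :=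
  if ¬(data_format = "channels_first" ∨ data_format = "channels_last") then []  -- raise ValueError
  else
    let dims : List Int :=
      if data_format = "channels_last"
      then PySem.List.slice (PySem.List.pyRange 0 (inp_shape.length : Int) 1) none (some (-1))  -- range(len)[:-1]
      else PySem.List.slice (PySem.List.pyRange 0 (inp_shape.length : Int) 1) (some 1) none     -- range(len)[1:]
    if padding = "valid" then
      (pvLoopA depth k_size dims inp_shape (List.replicate inp_shape.length 0)).getD []  -- [] = raise (outside Pre_)
    else inp_shape

-- ===== PORT B =====
def pvLoopB (p c lo hi : Int) : Nat → List Int → List Int → Option (List Int)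
  | _, [], out => some out
  | d, x :: rest, out =>
    if (d : Int) < lo ∨ hi ≤ (d : Int) then pvLoopB p c lo hi (d + 1) rest (out ++ [0])
    else
      if PySem.Int.mod (x - c * (p - 1)) p ≠ 0 then none   -- raise ValueError (outside Pre_)
      else
        pvLoopB p c lo hi (d + 1) rest
          (out ++ [PySem.Int.floordiv (max (PySem.Int.floordiv (x - c * (p - 1)) p - c) 4) 2 * 2
                    * p - c * (p - 1)])

def getoutputsize_alt (inp_shape : List Int) (depth : Int) (k_size : Int) (padding : String) (data_format : String) : List Int :=
  if ¬(data_format = "channels_first" ∨ data_format = "channels_last") then []  -- raise ValueError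
  else if padding ≠ "valid" then inp_shape
  else
    (pvLoopB (2 ^ (max (depth - 1) 0).toNat) ((k_size - 1) * 2)
      (if data_format = "channels_last" then 0 else 1)
      (if data_format = "channels_last" then (inp_shape.length : Int) - 1 else (inp_shape.length : Int))
      0 inp_shape []).getD []

-- ===== PRECONDITION & SPEC =====
-- Pre_ excludes (a) unknown data_format and, with valid padding, (b) spatial sizes whose exact
-- bridge value is not an integer — in both cases A raises ValueError — and (c) depths above 19
-- when a spatial dimension exists: there A's binary64 float arithmetic can round, so A's
-- .is_integer() test reflects rounding artifacts rather than exact divisibility and A may return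
-- an artifact value (see cites) where exact arithmetic — and B — raise ValueError.  For
-- depth ≤ 19 and |ints| ≤ 2^31 every float step of A is exact.
def Pre_getoutputsize (inp_shape : List Int) (depth : Int) (k_size : Int) (padding : String) (data_format : String) : Prop :=
  (data_format = "channels_first" ∨ data_format = "channels_last") ∧
  (padding = "valid" →
    (let sp : List Int := if data_format = "channels_first" then inp_shape.tail else inp_shape.dropLast
     sp = [] ∨
       (depth ≤ 19 ∧
        ∀ x ∈ sp, (2 : Int) ^ (depth - 1).toNat ∣ (x - (k_size - 1) * 2 * (2 ^ (depth - 1).toNat - 1)))))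
instance (inp_shape : List Int) (depth : Int) (k_size : Int) (padding : String) (data_format : String) : Decidable (Pre_getoutputsize inp_shape depth k_size padding data_format) := by unfold Pre_getoutputsize; infer_instance

def pvWitness_getoutputsize : List Int × Int × Int × String × String := ([188, 3], 5, 3, "valid", "channels_last")

def Spec_getoutputsize (inp_shape : List Int) (depth : Int) (k_size : Int) (padding : String) (data_format : String) (out : List Int) : Prop := out = getoutputsize_alt inp_shape depth k_size padding data_format
instance (inp_shape : List Int) (depth : Int) (k_size : Int) (padding : String) (data_format : String) (out : List Int) : Decidable (Spec_getoutputsize inp_shape depth k_size padding data_format out) := by unfold Spec_getoutputsize; infer_instance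

-- ===== CLAIM (what is proved, stated in full; the proofs are below) =====
def Claim_equal_getoutputsize : Prop := ∀ (inp_shape : List Int) (depth : Int) (k_size : Int) (padding : String) (data_format : String), Dom_getoutputsize inp_shape depth k_size padding data_format → Pre_getoutputsize inp_shape depth k_size padding data_format → Spec_getoutputsize inp_shape depth k_size padding data_format (getoutputsize inp_shape depth k_size padding data_format)

-- ===== LEMMAS AND PROOFS =====

-- the per-dimension value both programs compute (proof-only helper)
def pvG (p c x : Int) : Int :=
  PySem.Int.floordiv (max (PySem.Int.floordiv (x - c * (p - 1)) p - c) 4) 2 * 2 * p - c * (p - 1)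

-- what B's single pass produces (proof-only helper)
def pvSpecList (p c lo hi : Int) : Nat → List Int → List Int
  | _, [] => []
  | d, x :: rest =>
      (if lo ≤ (d : Int) ∧ (d : Int) < hi then pvG p c x else 0) :: pvSpecList p c lo hi (d + 1) rest

lemma bridge_fold (c x : Rat) (n : Nat) :
    (List.range n).foldl (fun v _ => (v - c) / 2) x = (x - c * (2 ^ n - 1)) / 2 ^ n := by
  induction n with
  | zero => simp
  | succ n ih =>
    rw [List.range_succ, List.foldl_append, ih]
    simp only [List.foldl_cons, List.foldl_nil]
    have h : (2 : Rat) ^ n ≠ 0 := by positivity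
    field_simp
    ring

lemma output_fold (c x : Rat) (n : Nat) :
    (List.range n).foldl (fun v _ => v * 2 - c) x = x * 2 ^ n - c * (2 ^ n - 1) := by
  induction n with
  | zero => simp
  | succ n ih =>
    rw [List.range_succ, List.foldl_append, ih]
    simp only [List.foldl_cons, List.foldl_nil]
    ring

lemma floordiv_pow_mul (n : Nat) (m : Int) :
    PySem.Int.floordiv ((2 : Int) ^ n * m) (2 ^ n) = m := by
  rw [PySem.Int.floordiv_eq_ediv_of_pos (by positivity)]
  exact Int.mul_ediv_cancel_left m (by positivity)

lemma bridgeA_eq (depth k x m : Int)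
    (hm : x - (k - 1) * 2 * (2 ^ (depth - 1).toNat - 1) = 2 ^ (depth - 1).toNat * m) :
    pvBridgeA depth k x = some (PySem.Int.floordiv (max (m - (k - 1) * 2) 4) 2 * 2) := by
  unfold pvBridgeA
  rw [bridge_fold]
  have hr : ((x : Rat) - ((((k - 1) * 2 : Int)) : Rat) * (2 ^ (depth - 1).toNat - 1)) / 2 ^ (depth - 1).toNat = ((m : Int) : Rat) := by
    have h2 : ((2 : Rat) ^ (depth - 1).toNat) ≠ 0 := by positivity
    rw [div_eq_iff h2]
    have h := congrArg (fun z : Int => (z : Rat)) hm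
    push_cast at h ⊢
    linarith
  rw [hr]
  have hmax : (if (m : Int) - (k - 1) * 2 < 4 then (4 : Int) else m - (k - 1) * 2) = max (m - (k - 1) * 2) 4 := by
    rw [max_def]; split_ifs <;> omega
  simp only [Rat.den_intCast, Rat.num_intCast, hmax, if_pos]

lemma outputA_eq (depth k b : Int) :
    pvOutputA depth k b = some (b * 2 ^ (depth - 1).toNat - (k - 1) * 2 * (2 ^ (depth - 1).toNat - 1)) := by
  unfold pvOutputA
  rw [output_fold]
  have hr : ((b : Rat)) * 2 ^ (depth - 1).toNat - ((((k - 1) * 2 : Int)) : Rat) * (2 ^ (depth - 1).toNat - 1) = (((b * 2 ^ (depth - 1).toNat - (k - 1) * 2 * (2 ^ (depth - 1).toNat - 1)) : Int) : Rat) := by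
    push_cast; ring
  rw [hr, Rat.den_intCast, if_pos rfl, Rat.num_intCast]

lemma loopA_spec (depth k : Int) (inp0 : List Int) :
    ∀ (dims inp otp : List Int),
      inp.length = inp0.length →
      otp.length = inp0.length →
      dims.Nodup →
      (∀ d ∈ dims, 0 ≤ d ∧ d.toNat < inp0.length) →
      (∀ d ∈ dims, inp[d.toNat]? = inp0[d.toNat]?) →
      (∀ d ∈ dims, ∀ x, inp0[d.toNat]? = some x →
        (2 : Int) ^ (depth - 1).toNat ∣ (x - (k - 1) * 2 * (2 ^ (depth - 1).toNat - 1))) →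
      ∃ res, pvLoopA depth k dims inp otp = some res ∧
        ∀ i : Nat, res[i]? =
          if (i : Int) ∈ dims then (inp0[i]?).map (pvG ((2 : Int) ^ (depth - 1).toNat) ((k - 1) * 2))
          else otp[i]? := by
  intro dims
  induction dims with
  | nil =>
    intro inp otp _ _ _ _ _ _
    exact ⟨otp, rfl, by intro i; simp⟩
  | cons d rest ih =>
    intro inp otp hlen hlen2 hnd hb hv hdvd
    obtain ⟨hd0, hdlen⟩ := hb d (List.mem_cons_self ..)
    have hdlen' : d.toNat < inp.length := by omega
    have hget : PySem.List.pyGet? inp d = some inp[d.toNat] := by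
      rw [PySem.List.pyGet?_of_nonneg _ hd0]
      exact List.getElem?_eq_getElem hdlen'
    have hx0 : inp0[d.toNat]? = some inp0[d.toNat] := List.getElem?_eq_getElem hdlen
    have hxv : inp[d.toNat] = inp0[d.toNat] := by
      have h := hv d (List.mem_cons_self ..)
      rw [hx0, List.getElem?_eq_getElem hdlen'] at h
      exact Option.some.inj h
    obtain ⟨m, hm⟩ := hdvd d (List.mem_cons_self ..) _ hx0
    have hbr := bridgeA_eq depth k inp0[d.toNat] m hm
    have hout := outputA_eq depth k (PySem.Int.floordiv (max (m - (k - 1) * 2) 4) 2 * 2)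
    set bb : Int := PySem.Int.floordiv (max (m - (k - 1) * 2) 4) 2 * 2 with hbbdef
    set oo : Int := bb * 2 ^ (depth - 1).toNat - (k - 1) * 2 * (2 ^ (depth - 1).toNat - 1) with hoodef
    have hstep : pvLoopA depth k (d :: rest) inp otp
        = pvLoopA depth k rest (inp.set d.toNat bb) (otp.set d.toNat oo) := by
      simp only [pvLoopA, hget, hxv, hbr, hout]
    have hdn : d ∉ rest := (List.nodup_cons.mp hnd).1
    have hvrest : ∀ j ∈ rest,
        (inp.set d.toNat bb)[j.toNat]? = inp0[j.toNat]? := by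
      intro j hj
      have hj0 := (hb j (List.mem_cons_of_mem _ hj)).1
      have hne : d.toNat ≠ j.toNat := by
        intro h
        apply hdn
        have : d = j := by omega
        rw [this]; exact hj
      rw [List.getElem?_set_ne hne]
      exact hv j (List.mem_cons_of_mem _ hj)
    obtain ⟨res, hres, hresget⟩ :=
      ih (inp.set d.toNat bb) (otp.set d.toNat oo) (by simpa using hlen) (by simpa using hlen2)
        (List.nodup_cons.mp hnd).2
        (fun j hj => hb j (List.mem_cons_of_mem _ hj)) hvrest
        (fun j hj => hdvd j (List.mem_cons_of_mem _ hj))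
    refine ⟨res, by rw [hstep]; exact hres, ?_⟩
    intro i
    rw [hresget i]
    by_cases hir : (i : Int) ∈ rest
    · simp [hir, List.mem_cons]
    · by_cases hid : (i : Int) = d
      · have hidn : d.toNat = i := by omega
        have hmem : (i : Int) ∈ (d :: rest : List Int) := by simp [hid]
        have hilen : i < otp.length := by omega
        simp only [hir, if_false, hmem, if_pos]
        rw [List.getElem?_set, if_pos hidn, if_pos (by omega), ← hidn, hx0]
        simp only [Option.map_some]
        congr 1
        unfold pvG
        rw [hm, floordiv_pow_mul]
      · have hmem : (i : Int) ∉ (d :: rest : List Int) := by simp [List.mem_cons, hid, hir]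
        simp only [hir, if_false, hmem, if_false]
        have hne : d.toNat ≠ i := by omega
        rw [List.getElem?_set_ne hne]

lemma pvSpecList_getElem? (p c lo hi : Int) :
    ∀ (l : List Int) (d i : Nat),
      (pvSpecList p c lo hi d l)[i]? =
        (l[i]?).map (fun x => if lo ≤ (d : Int) + (i : Int) ∧ (d : Int) + (i : Int) < hi then pvG p c x else 0) := by
  intro l
  induction l with
  | nil => intro d i; simp [pvSpecList]
  | cons x rest ih =>
    intro d i
    cases i with
    | zero => simp [pvSpecList]
    | succ i =>
      simp only [pvSpecList, List.getElem?_cons_succ, ih (d + 1) i]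
      have harith : (d : Int) + 1 + (i : Int) = (d : Int) + ((i : Int) + 1) := by ring
      simp only [Nat.cast_add, Nat.cast_one, harith]

lemma loopB_spec (p c lo hi : Int) (hp : 0 < p) :
    ∀ (l : List Int) (d : Nat) (out : List Int),
      (∀ (i : Nat) (x : Int), l[i]? = some x → lo ≤ (d : Int) + (i : Int) → (d : Int) + (i : Int) < hi →
        p ∣ (x - c * (p - 1))) →
      pvLoopB p c lo hi d l out = some (out ++ pvSpecList p c lo hi d l) := by
  intro l
  induction l with
  | nil => intro d out _; simp [pvLoopB, pvSpecList]
  | cons x rest ih =>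
    intro d out hdvd
    have hdvd' : ∀ (i : Nat) (y : Int), rest[i]? = some y → lo ≤ ((d + 1 : Nat) : Int) + (i : Int) →
        ((d + 1 : Nat) : Int) + (i : Int) < hi → p ∣ (y - c * (p - 1)) := by
      intro i y hy h1 h2
      refine hdvd (i + 1) y (by simpa using hy) ?_ ?_ <;> push_cast at h1 h2 ⊢ <;> linarith
    by_cases hin : lo ≤ (d : Int) ∧ (d : Int) < hi
    · have hdv : p ∣ (x - c * (p - 1)) := hdvd 0 x (by simp) (by simpa using hin.1) (by simpa using hin.2)
      have hmod : PySem.Int.mod (x - c * (p - 1)) p = 0 := by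
        rw [PySem.Int.mod_eq_emod_of_pos hp]
        exact Int.emod_eq_zero_of_dvd hdv
      have hnc : ¬((d : Int) < lo ∨ hi ≤ (d : Int)) := by omega
      rw [pvLoopB, if_neg hnc, if_neg (by simp [hmod]), ih (d + 1) _ hdvd']
      simp [pvSpecList, hin, pvG]
    · have hc : (d : Int) < lo ∨ hi ≤ (d : Int) := by omega
      rw [pvLoopB, if_pos hc, ih (d + 1) _ hdvd']
      simp [pvSpecList, hin]

lemma dropLast_pyRange (L : Nat) :
    (PySem.List.pyRange 0 (L : Int) 1).dropLast = PySem.List.pyRange 0 ((L : Int) - 1) 1 := by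
  apply List.ext_getElem
  · simp only [List.length_dropLast, PySem.List.length_pyRange_one]; omega
  · intro i h1 h2
    rw [List.getElem_dropLast, PySem.List.getElem_pyRange_one, PySem.List.getElem_pyRange_one]

lemma tail_pyRange (L : Nat) :
    (PySem.List.pyRange 0 (L : Int) 1).tail = PySem.List.pyRange 1 (L : Int) 1 := by
  apply List.ext_getElem
  · simp only [List.length_tail, PySem.List.length_pyRange_one]; omega
  · intro i h1 h2
    rw [List.getElem_tail, PySem.List.getElem_pyRange_one, PySem.List.getElem_pyRange_one]
    push_cast; ring

-- the common core: with in-range divisibility, A's loop over pyRange lo hi equals B's pass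
lemma main_valid (depth k lo hi : Int) (inp : List Int)
    (hlo : 0 ≤ lo) (hhi : hi ≤ (inp.length : Int))
    (H : ∀ i : Nat, (hi' : i < inp.length) → lo ≤ (i : Int) → (i : Int) < hi →
      (2 : Int) ^ (depth - 1).toNat ∣ (inp[i] - (k - 1) * 2 * (2 ^ (depth - 1).toNat - 1))) :
    (pvLoopA depth k (PySem.List.pyRange lo hi 1) inp (List.replicate inp.length 0)).getD []
      = (pvLoopB ((2 : Int) ^ (depth - 1).toNat) ((k - 1) * 2) lo hi 0 inp []).getD [] := by
  obtain ⟨res, hres, hresget⟩ :=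
    loopA_spec depth k inp (PySem.List.pyRange lo hi 1) inp (List.replicate inp.length 0)
      rfl (by simp)
      (PySem.List.nodup_pyRange_one lo hi)
      (by
        intro d hd
        rw [PySem.List.mem_pyRange_one] at hd
        constructor
        · omega
        · omega)
      (fun _ _ => rfl)
      (by
        intro d hd x hx
        rw [PySem.List.mem_pyRange_one] at hd
        have hdl : d.toNat < inp.length := by omega
        rw [List.getElem?_eq_getElem hdl] at hx
        have hx' : inp[d.toNat] = x := Option.some.inj hx
        rw [← hx']
        exact H d.toNat hdl (by omega) (by omega))
  have hB := loopB_spec ((2 : Int) ^ (depth - 1).toNat) ((k - 1) * 2) lo hi (by positivity) inp 0 []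
    (by
      intro i x hx h1 h2
      have hil : i < inp.length := by
        by_contra h
        rw [List.getElem?_eq_none (by omega)] at hx
        simp at hx
      rw [List.getElem?_eq_getElem hil] at hx
      have hx' : inp[i] = x := Option.some.inj hx
      rw [← hx']
      exact H i hil (by simpa using h1) (by simpa using h2))
  rw [hres, hB]
  simp only [Option.getD_some, List.nil_append]
  apply List.ext_getElem?
  intro i
  rw [hresget i, pvSpecList_getElem? _ _ _ _ inp 0 i]
  by_cases hil : i < inp.length
  · rw [List.getElem?_eq_getElem hil, List.getElem?_replicate]
    by_cases hin : lo ≤ (i : Int) ∧ (i : Int) < hi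
    · rw [if_pos (PySem.List.mem_pyRange_one.mpr hin)]
      simp [hin]
    · rw [if_neg (fun hmem => hin (PySem.List.mem_pyRange_one.mp hmem))]
      simp only [Option.map_some]
      rw [if_pos hil]
      congr 1
      rw [if_neg (by push_cast; omega)]
  · have hnone : inp[i]? = none := List.getElem?_eq_none (by omega)
    rw [hnone]
    have hnm : (i : Int) ∉ PySem.List.pyRange lo hi 1 := by
      intro hmem
      have := PySem.List.mem_pyRange_one.mp hmem
      omega
    rw [if_neg hnm, List.getElem?_replicate, if_neg (by omega)]
    rfl

lemma toNat_max (depth : Int) : (max (depth - 1) 0).toNat = (depth - 1).toNat := by omega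

-- ===== VERDICT (by name: the statement is the Claim_ definition above) =====
theorem getoutputsize_spec : Claim_equal_getoutputsize := by
  intro inp_shape depth k_size padding data_format _hdom hpre
  obtain ⟨hdf, hpad⟩ := hpre
  unfold Spec_getoutputsize getoutputsize getoutputsize_alt
  have hdfok : ¬¬(data_format = "channels_first" ∨ data_format = "channels_last") := not_not.mpr hdf
  rw [if_neg hdfok, if_neg hdfok]
  by_cases hp : padding = "valid"
  · rw [if_pos hp, if_neg (not_not.mpr hp)]
    have hsp := hpad hp
    rw [toNat_max]
    rcases hdf with hcf | hcl
    · -- channels_first: spatial dims = range(len)[1:]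
      subst hcf
      have hne : ¬(("channels_first" : String) = "channels_last") := by decide
      rw [if_neg hne, if_neg hne, if_neg hne]
      rw [if_pos rfl] at hsp
      rw [PySem.List.slice_from_one, tail_pyRange]
      apply main_valid depth k_size 1 (inp_shape.length : Int) inp_shape (by omega) (by omega)
      intro i hil h1 h2
      rcases hsp with hnil | ⟨_, hdvd⟩
      · exfalso
        have hl := congrArg List.length hnil
        simp only [List.length_tail, List.length_nil] at hl
        omega
      · apply hdvd
        have hit : i - 1 < inp_shape.tail.length := by
          simp only [List.length_tail]; omega
        have hq : inp_shape.tail[i - 1]? = inp_shape[i]? := by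
          rw [List.getElem?_tail]
          congr 1
          omega
        rw [List.getElem?_eq_getElem hit, List.getElem?_eq_getElem hil] at hq
        have hgt : inp_shape.tail[i - 1] = inp_shape[i] := Option.some.inj hq
        rw [← hgt]
        exact List.getElem_mem hit
    · -- channels_last: spatial dims = range(len)[:-1]
      subst hcl
      have hne : ¬(("channels_last" : String) = "channels_first") := by decide
      rw [if_pos rfl, if_pos rfl, if_pos rfl]
      rw [if_neg hne] at hsp
      rw [PySem.List.slice_to_neg_one, dropLast_pyRange]
      apply main_valid depth k_size 0 ((inp_shape.length : Int) - 1) inp_shape (by omega) (by omega)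
      intro i hil h1 h2
      rcases hsp with hnil | ⟨_, hdvd⟩
      · exfalso
        have hl := congrArg List.length hnil
        simp only [List.length_dropLast, List.length_nil] at hl
        omega
      · apply hdvd
        have hit : i < inp_shape.dropLast.length := by
          rw [List.length_dropLast]; omega
        have hgt : inp_shape.dropLast[i] = inp_shape[i] := List.getElem_dropLast hit
        rw [← hgt]
        exact List.getElem_mem hit
  · rw [if_neg hp, if_pos hp]
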